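-- pv_equiv track=rewrite | github.com/PanieriLorenzo/abstract-lang | python-naive/parser_.py | _nested_brace_helper
-- ===== SOURCE A (Python) =====
-- from typing import Tuple
--
-- def _nested_brace_helper(s: str) -> Tuple[str, str]:
--     """takes a section of code that may contain a "forest" of nested braces
--     (the "trees" of this analogy) and splits it into the first tree and the
--     remainder of the string. It also "peels off" the top-layer of the first
--     tree before returning it.
--
--     ## Examples
--     - `"{ a } something { b }"` becomes `"a"`, `"something { b }"`
--     - `"{ { a } { b } }"` becomes `"{ a } { b }"`, `""`
--
--     Note that in the second example, there is only one tree in the forest, so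
--     the remainder string is empty.
--
--     To fully un-nest the braces, this function needs to be used within some
--     other recursive function.
--     """
--
--     n_braces = 1
--     i = 1
--     itr = iter(s[1:])
--     while True:
--         # we start with 1 brace, each time we enter a deeper layer, n_braces
--         # is incremented, it can only be 0 if we have exited all layers, in
--         # which case, we don't need to get the next character, and we can
--         # return the splitted string at the index we got to.
--         if n_braces == 0:
--             return (s[1: i - 1].strip(), s[i:].strip())
--
--         # if we get here and the string is exhausted, there is no way for
--         # n_braces to get to 0, so there must be an unmatched brace
--         try:
--             c = next(itr)
--         except StopIteration:
--             raise SyntaxError("dangling brace")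
--         i += 1
--
--         if c == "{":
--             n_braces += 1
--             continue
--         if c == "}":
--             n_braces -= 1
--             continue
-- ===== SOURCE B (Python) =====
-- from typing import Tuple
--
--
-- def _skip_tree(s: str, pos: int) -> int:
--     """Return the index just past the '}' that closes a brace assumed already
--     open before `pos`, recursing once into each nested subtree."""
--     while pos < len(s):
--         ch = s[pos]
--         pos += 1
--         if ch == "}":
--             return pos
--         if ch == "{":
--             pos = _skip_tree(s, pos)
--     raise SyntaxError("dangling brace")
--
--
-- def _nested_brace_helper(s: str) -> Tuple[str, str]:
--     end = _skip_tree(s, 1)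
--     return (s[1:end - 1].strip(), s[end:].strip())
-- ===== Notes on version B (the rewrite author's own statement) =====
-- stated objective: alternative
-- what changed: B has no brace-depth counter: a recursive-descent helper matches the open brace by recursing into each nested subtree (one recursive call per inner '{') and returns the index just past the matching '}', while A runs a flat iterator loop maintaining an n_braces counter.
import Mathlib
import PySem

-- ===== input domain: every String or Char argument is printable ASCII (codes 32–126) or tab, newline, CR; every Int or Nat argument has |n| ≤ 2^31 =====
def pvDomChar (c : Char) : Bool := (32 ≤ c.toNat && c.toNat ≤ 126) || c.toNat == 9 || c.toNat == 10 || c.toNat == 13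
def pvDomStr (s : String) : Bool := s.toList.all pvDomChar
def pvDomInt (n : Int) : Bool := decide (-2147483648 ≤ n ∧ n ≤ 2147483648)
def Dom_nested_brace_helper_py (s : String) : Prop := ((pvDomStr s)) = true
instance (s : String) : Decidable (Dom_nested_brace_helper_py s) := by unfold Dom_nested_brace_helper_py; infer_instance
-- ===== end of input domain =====

-- B replaces A's flat n_braces-counter loop by a recursive-descent matcher that
-- recurses once into each nested subtree; objective: alternative.

-- ===== PORT A =====
-- A's while-True loop: state (n_braces, i, remaining iterator); where Python raises
-- SyntaxError (StopIteration) the port returns ("", "") — excluded by Pre_.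
def aRet (t : List Char) (i : Nat) : String × String :=
  (String.ofList (PySem.Chars.strip (PySem.List.slice t (some 1) (some ((i : Int) - 1)))),
   String.ofList (PySem.Chars.strip (PySem.List.slice t (some (i : Int)) none)))

def aLoopA (t : List Char) (n : Int) (i : Nat) : List Char → String × String
  | [] => if n = 0 then aRet t i else ("", "")
  | c :: rest =>
    if n = 0 then aRet t i
    else aLoopA t (if c = '{' then n + 1 else if c = '}' then n - 1 else n) (i + 1) rest

def nested_brace_helper_py (s : String) : String × String :=
  aLoopA s.toList 1 1 (PySem.List.slice s.toList (some 1) none)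

-- ===== PORT B =====
-- B's _skip_tree: the cursor `pos` becomes the remaining character list; the result
-- is (number of characters consumed through the matching '}', remainder). `none` =
-- Python's SyntaxError. Fuel (list length at the top call) only makes the nested
-- recursion structurally total; it is never exhausted when ≥ the list length.
def bSkip : Nat → List Char → Option (Nat × List Char)
  | 0, _ => none
  | _ + 1, [] => none
  | fuel + 1, c :: rest =>
    if c = '}' then some (1, rest)
    else if c = '{' then
      match bSkip fuel rest with
      | none => none
      | some (k, r) =>                 -- skipped the nested subtree …
        match bSkip fuel r with        -- … then the while-loop continues after it
        | none => none
        | some (m, r') => some (1 + k + m, r')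
    else
      match bSkip fuel rest with
      | none => none
      | some (k, r) => some (1 + k, r)

def nested_brace_helper_py_alt (s : String) : String × String :=
  let t := s.toList
  match bSkip t.length (t.drop 1) with
  | none => ("", "")                   -- Python: raise SyntaxError("dangling brace")
  | some (k, _) =>
    let e : Int := 1 + (k : Int)       -- end = _skip_tree(s, 1)
    (String.ofList (PySem.Chars.strip (PySem.List.slice t (some 1) (some (e - 1)))),
     String.ofList (PySem.Chars.strip (PySem.List.slice t (some e) none)))

-- ===== PRECONDITION & SPEC =====
-- Pre_ excludes exactly the inputs on which A raises SyntaxError (dangling brace):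
-- those where the brace depth, starting at 1 over s[1:], never reaches 0.
def Pre_nested_brace_helper_py (s : String) : Prop :=
  ∃ k ≤ s.length, ((s.toList.drop 1).take k).count '}' = ((s.toList.drop 1).take k).count '{' + 1
instance (s : String) : Decidable (Pre_nested_brace_helper_py s) := by
  unfold Pre_nested_brace_helper_py; infer_instance

def pvWitness_nested_brace_helper_py : String := "{ a } b"

def Spec_nested_brace_helper_py (s : String) (out : String × String) : Prop := out = nested_brace_helper_py_alt s
instance (s : String) (out : String × String) : Decidable (Spec_nested_brace_helper_py s out) := by unfold Spec_nested_brace_helper_py; infer_instance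

-- ===== CLAIM (what is proved, stated in full; the proofs are below) =====
def Claim_equal_nested_brace_helper_py : Prop := ∀ (s : String), Dom_nested_brace_helper_py s → Pre_nested_brace_helper_py s → Spec_nested_brace_helper_py s (nested_brace_helper_py s)

-- ===== LEMMAS AND PROOFS =====

lemma bSkip_nil (fuel : Nat) : bSkip fuel [] = none := by
  cases fuel <;> simp [bSkip]

-- bSkip consumes k ≥ 1 characters and returns exactly the rest
lemma bSkip_len : ∀ (fuel : Nat) (l : List Char) (k : Nat) (r : List Char),
    bSkip fuel l = some (k, r) → k + r.length = l.length ∧ 1 ≤ k := by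
  intro fuel
  induction fuel with
  | zero => intro l k r h; simp [bSkip] at h
  | succ f ih =>
    intro l k r h
    cases l with
    | nil => simp [bSkip] at h
    | cons c rest =>
      simp only [bSkip] at h
      split_ifs at h with h1 h2
      · simp at h
        obtain ⟨hk, hr⟩ := h
        subst hk; subst hr
        simp
        omega
      · cases hb1 : bSkip f rest with
        | none => rw [hb1] at h; simp at h
        | some p1 =>
          obtain ⟨k1, r1⟩ := p1
          rw [hb1] at h
          simp at h
          cases hb2 : bSkip f r1 with
          | none => rw [hb2] at h; simp at h
          | some p2 =>
            obtain ⟨k2, r2⟩ := p2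
            rw [hb2] at h
            simp at h
            obtain ⟨hk, hr⟩ := h
            obtain ⟨e1, e1'⟩ := ih rest k1 r1 hb1
            obtain ⟨e2, e2'⟩ := ih r1 k2 r2 hb2
            subst hk; subst hr
            simp
            omega
      · cases hb1 : bSkip f rest with
        | none => rw [hb1] at h; simp at h
        | some p1 =>
          obtain ⟨k1, r1⟩ := p1
          rw [hb1] at h
          simp at h
          obtain ⟨hk, hr⟩ := h
          obtain ⟨e1, e1'⟩ := ih rest k1 r1 hb1
          subst hk; subst hr
          simp
          omega

lemma aLoopA_zero (t : List Char) (i : Nat) (r : List Char) :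
    aLoopA t 0 i r = aRet t i := by
  cases r <;> simp [aLoopA]

-- core simulation: A's counter loop at depth n+1 equals "skip one tree, then
-- continue at depth n"
lemma aLoop_eq_bSkip (t : List Char) :
    ∀ (fuel : Nat) (itr : List Char), itr.length ≤ fuel → ∀ (n : Int), 0 ≤ n → ∀ (i : Nat),
    aLoopA t (n + 1) i itr =
      (match bSkip fuel itr with
       | none => (("" : String), ("" : String))
       | some (k, r) => aLoopA t n (i + k) r) := by
  intro fuel
  induction fuel with
  | zero =>
    intro itr hlen n hn i
    have : itr = [] := List.length_eq_zero_iff.mp (Nat.le_zero.mp hlen)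
    subst this
    simp [bSkip, aLoopA]
    omega
  | succ f ih =>
    intro itr hlen n hn i
    cases itr with
    | nil =>
      simp [bSkip_nil, aLoopA]
      omega
    | cons c rest =>
      have hne : n + 1 ≠ 0 := by omega
      have hstep : aLoopA t (n + 1) i (c :: rest)
          = aLoopA t (if c = '{' then n + 1 + 1 else if c = '}' then n + 1 - 1 else n + 1) (i + 1) rest := by
        simp [aLoopA, hne]
      have hrl : rest.length ≤ f := by simpa using hlen
      by_cases h1 : c = '}'
      · rw [hstep]
        simp [h1, bSkip]
      · by_cases h2 : c = '{'
        · rw [hstep]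
          simp only [h2, if_true]
          rw [ih rest hrl (n + 1) (by omega) (i + 1)]
          show _ = (match bSkip (f + 1) ('{' :: rest) with
                    | none => (("" : String), ("" : String))
                    | some (k, r) => aLoopA t n (i + k) r)
          simp only [bSkip, if_neg (by decide : ¬ ('{' = '}'))]
          cases hb1 : bSkip f rest with
          | none => simp
          | some p1 =>
            obtain ⟨k1, r1⟩ := p1
            have hr1 : r1.length ≤ f := by
              have := bSkip_len f rest k1 r1 hb1
              omega
            simp only []
            rw [ih r1 hr1 n hn (i + 1 + k1)]
            cases hb2 : bSkip f r1 with
            | none => simp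
            | some p2 =>
              obtain ⟨k2, r2⟩ := p2
              simp only []
              congr 1
              omega
        · rw [hstep]
          simp only [h2, h1, if_false]
          rw [ih rest hrl n hn (i + 1)]
          show _ = (match bSkip (f + 1) (c :: rest) with
                    | none => (("" : String), ("" : String))
                    | some (k, r) => aLoopA t n (i + k) r)
          simp only [bSkip, if_neg h1, if_neg h2]
          cases hb1 : bSkip f rest with
          | none => simp
          | some p1 =>
            obtain ⟨k1, r1⟩ := p1
            simp only []
            congr 1
            omega

lemma main_eq (s : String) : nested_brace_helper_py s = nested_brace_helper_py_alt s := by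
  have hA : nested_brace_helper_py s
      = (match bSkip s.toList.length (s.toList.drop 1) with
         | none => (("" : String), ("" : String))
         | some (k, _) => aRet s.toList (1 + k)) := by
    unfold nested_brace_helper_py
    rw [PySem.List.slice_from_one]
    have hdt : s.toList.tail = s.toList.drop 1 := by cases s.toList <;> simp
    rw [hdt]
    rw [show (1 : Int) = (0 : Int) + 1 from by norm_num]
    rw [aLoop_eq_bSkip s.toList s.toList.length (s.toList.drop 1)
      (by simp) 0 le_rfl 1]
    cases bSkip s.toList.length (s.toList.drop 1) with
    | none => rfl
    | some p => obtain ⟨k, r⟩ := p; simp [aLoopA_zero]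
  have hB : nested_brace_helper_py_alt s
      = (match bSkip s.toList.length (s.toList.drop 1) with
         | none => (("" : String), ("" : String))
         | some (k, _) => aRet s.toList (1 + k)) := by
    unfold nested_brace_helper_py_alt
    cases hb : bSkip s.toList.length (s.toList.drop 1) with
    | none => simp only [hb]
    | some p =>
      obtain ⟨k, r⟩ := p
      simp only [hb, aRet]
      push_cast
      rfl
  rw [hA, hB]

-- ===== VERDICT (by name: the statement is the Claim_ definition above) =====
theorem nested_brace_helper_py_spec : Claim_equal_nested_brace_helper_py := by
  intro s _ _
  exact main_eq s
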